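-- pv_equiv track=rewrite | github.com/MatthewPDingle/PokerAnalytics | src/poker_analytics/data/cards.py | parse_cards_text
-- ===== SOURCE A (Python) =====
-- from typing import List, Tuple
--
-- SUITS = {"S", "H", "D", "C"}
--
-- CARD_RANKS = {"2": 2, "3": 3, "4": 4, "5": 5, "6": 6, "7": 7, "8": 8, "9": 9, "T": 10, "J": 11, "Q": 12, "K": 13, "A": 14}
--
-- def parse_cards_text(text: str | None) -> List[Tuple[str, int, str]]:
--     """Parse DriveHUD two-character card tokens into structured tuples.
--
--     Returns a list of tuples in the form ``(suit, rank_value, original_token)``.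
--     ``original_token`` preserves the raw input (e.g., ``"HK"``).
--     The function is intentionally strict: encountering malformed tokens
--     results in an empty list, mirroring the legacy notebook behaviour.
--     """
--
--     if not text:
--         return []
--     parts = [p.strip() for p in text.split() if p.strip()]
--     cards: List[Tuple[str, int, str]] = []
--     for part in parts:
--         if len(part) != 2:
--             return []
--         suit, rank = part[0].upper(), part[1].upper()
--         if suit not in SUITS or rank not in CARD_RANKS:
--             return []
--         cards.append((suit, CARD_RANKS[rank], f"{suit}{rank}"))
--     return cards
-- ===== SOURCE B (Python) =====
-- from typing import List, Tuple
--
-- SUITS = {"S", "H", "D", "C"}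
--
-- CARD_RANKS = {"2": 2, "3": 3, "4": 4, "5": 5, "6": 6, "7": 7, "8": 8, "9": 9, "T": 10, "J": 11, "Q": 12, "K": 13, "A": 14}
--
-- # Precomputed table of all 52 valid uppercase tokens -> finished tuples.
-- CARD_TABLE = {suit + rank: (suit, value, suit + rank)
--               for suit in ("S", "H", "D", "C")
--               for rank, value in CARD_RANKS.items()}
--
--
-- def parse_cards_text(text: str | None) -> List[Tuple[str, int, str]]:
--     if not text:
--         return []
--     try:
--         return [CARD_TABLE[tok.upper()] for tok in text.split()]
--     except KeyError:
--         return []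
-- ===== Notes on version B (the rewrite author's own statement) =====
-- stated objective: alternative
-- what changed: B precomputes a 52-entry table keyed by the full uppercase two-character token and maps each split token through a single table lookup (all-or-nothing via try/except KeyError), replacing A's per-token length check, per-character suit-set and rank-dict membership tests and early-return accumulator loop.
import Mathlib
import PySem

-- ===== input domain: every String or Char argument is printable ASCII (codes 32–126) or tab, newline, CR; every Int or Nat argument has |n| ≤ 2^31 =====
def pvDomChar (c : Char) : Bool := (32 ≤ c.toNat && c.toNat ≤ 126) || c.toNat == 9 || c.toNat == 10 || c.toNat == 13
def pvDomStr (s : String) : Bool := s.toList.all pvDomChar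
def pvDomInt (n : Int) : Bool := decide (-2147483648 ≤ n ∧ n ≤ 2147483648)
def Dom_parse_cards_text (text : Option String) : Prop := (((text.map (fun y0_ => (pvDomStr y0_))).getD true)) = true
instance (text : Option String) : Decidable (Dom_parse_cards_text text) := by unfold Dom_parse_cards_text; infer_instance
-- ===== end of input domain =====

-- B replaces A's per-token validation (length check, per-character suit-set and rank-dict
-- membership) by a single lookup in a precomputed table of all 52 valid uppercase tokens,
-- mapped all-or-nothing over the split tokens; A = B is proved for every input.

-- ===== PORT A =====
def pvSUITS : PySem.Set String := PySem.Set.ofList ["S", "H", "D", "C"]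

def pvCARD_RANKS : PySem.Dict String Int :=
  PySem.Dict.ofList [("2", 2), ("3", 3), ("4", 4), ("5", 5), ("6", 6), ("7", 7), ("8", 8),
    ("9", 9), ("T", 10), ("J", 11), ("Q", 12), ("K", 13), ("A", 14)]

-- the 'for part in parts' loop with its early 'return []' and the 'cards' accumulator
def parseA_go : List String → List (String × Int × String) → List (String × Int × String)
  | [], cards => cards
  | part :: rest, cards =>
    if PySem.Str.len part ≠ 2 then []
    else
      match PySem.Str.pyGet? part 0, PySem.Str.pyGet? part 1 with
      | some c0, some c1 =>
        let suit := PySem.Str.upper (String.ofList [c0])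
        let rank := PySem.Str.upper (String.ofList [c1])
        if !(PySem.Set.contains pvSUITS suit) || !(PySem.Dict.contains pvCARD_RANKS rank) then []
        else parseA_go rest (cards ++ [(suit, PySem.Dict.getD pvCARD_RANKS rank 0, suit ++ rank)])
      | _, _ => []  -- unreachable: len part = 2, so part[0] / part[1] never raise

def parse_cards_text (text : Option String) : List (String × Int × String) :=
  match text with
  | none => []
  | some t =>
    if t = "" then []  -- 'if not text'
    else
      let parts := ((PySem.Str.split₀ t).filter
        (fun p => decide (PySem.Str.strip p ≠ ""))).map (fun p => PySem.Str.strip p)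
      parseA_go parts []

-- ===== PORT B =====
-- CARD_TABLE = {suit + rank: (suit, value, suit + rank) for suit in (...) for rank, value in CARD_RANKS.items()}
def pvCARD_TABLE : PySem.Dict String (String × Int × String) :=
  ["S", "H", "D", "C"].foldl (fun d s =>
    (PySem.Dict.items pvCARD_RANKS).foldl
      (fun d rv => PySem.Dict.insert d (s ++ rv.1) (s, rv.2, s ++ rv.1)) d) PySem.Dict.empty

-- CARD_TABLE[tok.upper()]; none is exactly the KeyError the comprehension's except catches
def parseB_lookup (tok : String) : Option (String × Int × String) :=
  PySem.Dict.get? pvCARD_TABLE (PySem.Str.upper tok)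

def parse_cards_text_alt (text : Option String) : List (String × Int × String) :=
  match text with
  | none => []
  | some t =>
    if t = "" then []  -- 'if not text'
    else
      -- the try/except comprehension: all-or-nothing over the tokens
      match (PySem.Str.split₀ t).mapM parseB_lookup with
      | some cards => cards
      | none => []

-- ===== PRECONDITION & SPEC =====
def Spec_parse_cards_text (text : Option String) (out : List (String × Int × String)) : Prop := out = parse_cards_text_alt text
instance (text : Option String) (out : List (String × Int × String)) : Decidable (Spec_parse_cards_text text out) := by unfold Spec_parse_cards_text; infer_instance

-- ===== CLAIM (what is proved, stated in full; the proofs are below) =====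
def Claim_equal_parse_cards_text : Prop := ∀ (text : Option String), Dom_parse_cards_text text → Spec_parse_cards_text text (parse_cards_text text)

-- ===== LEMMAS AND PROOFS =====

theorem eq_ofList_iff (k : String) (l : List Char) : (k = String.ofList l) ↔ (k.toList = l) := by
  constructor
  · rintro rfl; simp
  · intro h; apply String.toList_inj.mp; simpa using h

theorem ofList_eq_iff (l : List Char) (k : String) : (String.ofList l = k) ↔ (l = k.toList) := by
  rw [eq_comm, eq_ofList_iff, eq_comm]

-- the comprehension-built table, as a literal dict
set_option maxRecDepth 8192 in
theorem tableLit : pvCARD_TABLE = PySem.Dict.mk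
    [("S2", ("S", 2, "S2")), ("S3", ("S", 3, "S3")), ("S4", ("S", 4, "S4")), ("S5", ("S", 5, "S5")), ("S6", ("S", 6, "S6")), ("S7", ("S", 7, "S7")), ("S8", ("S", 8, "S8")), ("S9", ("S", 9, "S9")), ("ST", ("S", 10, "ST")), ("SJ", ("S", 11, "SJ")), ("SQ", ("S", 12, "SQ")), ("SK", ("S", 13, "SK")), ("SA", ("S", 14, "SA")),
    ("H2", ("H", 2, "H2")), ("H3", ("H", 3, "H3")), ("H4", ("H", 4, "H4")), ("H5", ("H", 5, "H5")), ("H6", ("H", 6, "H6")), ("H7", ("H", 7, "H7")), ("H8", ("H", 8, "H8")), ("H9", ("H", 9, "H9")), ("HT", ("H", 10, "HT")), ("HJ", ("H", 11, "HJ")), ("HQ", ("H", 12, "HQ")), ("HK", ("H", 13, "HK")), ("HA", ("H", 14, "HA")),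
    ("D2", ("D", 2, "D2")), ("D3", ("D", 3, "D3")), ("D4", ("D", 4, "D4")), ("D5", ("D", 5, "D5")), ("D6", ("D", 6, "D6")), ("D7", ("D", 7, "D7")), ("D8", ("D", 8, "D8")), ("D9", ("D", 9, "D9")), ("DT", ("D", 10, "DT")), ("DJ", ("D", 11, "DJ")), ("DQ", ("D", 12, "DQ")), ("DK", ("D", 13, "DK")), ("DA", ("D", 14, "DA")),
    ("C2", ("C", 2, "C2")), ("C3", ("C", 3, "C3")), ("C4", ("C", 4, "C4")), ("C5", ("C", 5, "C5")), ("C6", ("C", 6, "C6")), ("C7", ("C", 7, "C7")), ("C8", ("C", 8, "C8")), ("C9", ("C", 9, "C9")), ("CT", ("C", 10, "CT")), ("CJ", ("C", 11, "CJ")), ("CQ", ("C", 12, "CQ")), ("CK", ("C", 13, "CK")), ("CA", ("C", 14, "CA"))] := by rfl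

set_option maxRecDepth 8192 in
theorem ranksLit : pvCARD_RANKS = PySem.Dict.mk
    [("2", 2), ("3", 3), ("4", 4), ("5", 5), ("6", 6), ("7", 7), ("8", 8),
     ("9", 9), ("T", 10), ("J", 11), ("Q", 12), ("K", 13), ("A", 14)] := by rfl

-- every table key has two characters, so any other length misses
set_option maxRecDepth 8192 in
theorem table_keys_len2 : ∀ k ∈ PySem.Dict.keys pvCARD_TABLE, k.toList.length = 2 := by decide

theorem table_get?_none_of_len_ne (tok : String) (h : tok.toList.length ≠ 2) :
    PySem.Dict.get? pvCARD_TABLE tok = none := by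
  rw [PySem.Dict.get?_eq_none_iff_not_mem_keys]
  intro hmem
  exact h (table_keys_len2 tok hmem)

-- table lookup of a two-character key, characterised by A's per-character tests
set_option maxRecDepth 8192 in
theorem table_get?_pair (a b : Char) :
    PySem.Dict.get? pvCARD_TABLE (String.ofList [a, b]) =
      (if PySem.Set.contains pvSUITS (String.ofList [a]) &&
          PySem.Dict.contains pvCARD_RANKS (String.ofList [b]) then
        some (String.ofList [a], PySem.Dict.getD pvCARD_RANKS (String.ofList [b]) 0,
          String.ofList [a] ++ String.ofList [b])
      else none) := by
  rw [tableLit]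
  by_cases ha0 : a = 'S'
  · subst ha0
    by_cases hb0 : b = '2'
    · subst hb0; decide
    by_cases hb1 : b = '3'
    · subst hb1; decide
    by_cases hb2 : b = '4'
    · subst hb2; decide
    by_cases hb3 : b = '5'
    · subst hb3; decide
    by_cases hb4 : b = '6'
    · subst hb4; decide
    by_cases hb5 : b = '7'
    · subst hb5; decide
    by_cases hb6 : b = '8'
    · subst hb6; decide
    by_cases hb7 : b = '9'
    · subst hb7; decide
    by_cases hb8 : b = 'T'
    · subst hb8; decide
    by_cases hb9 : b = 'J'
    · subst hb9; decide
    by_cases hb10 : b = 'Q'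
    · subst hb10; decide
    by_cases hb11 : b = 'K'
    · subst hb11; decide
    by_cases hb12 : b = 'A'
    · subst hb12; decide
    rw [ranksLit]
    simp [PySem.Dict.get?, PySem.Dict.contains_mk, beq_iff_eq, eq_ofList_iff,
      Ne.symm hb0, Ne.symm hb1, Ne.symm hb2, Ne.symm hb3, Ne.symm hb4, Ne.symm hb5, Ne.symm hb6, Ne.symm hb7, Ne.symm hb8, Ne.symm hb9, Ne.symm hb10, Ne.symm hb11, Ne.symm hb12]
  by_cases ha1 : a = 'H'
  · subst ha1
    by_cases hb0 : b = '2'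
    · subst hb0; decide
    by_cases hb1 : b = '3'
    · subst hb1; decide
    by_cases hb2 : b = '4'
    · subst hb2; decide
    by_cases hb3 : b = '5'
    · subst hb3; decide
    by_cases hb4 : b = '6'
    · subst hb4; decide
    by_cases hb5 : b = '7'
    · subst hb5; decide
    by_cases hb6 : b = '8'
    · subst hb6; decide
    by_cases hb7 : b = '9'
    · subst hb7; decide
    by_cases hb8 : b = 'T'
    · subst hb8; decide
    by_cases hb9 : b = 'J'
    · subst hb9; decide
    by_cases hb10 : b = 'Q'
    · subst hb10; decide
    by_cases hb11 : b = 'K'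
    · subst hb11; decide
    by_cases hb12 : b = 'A'
    · subst hb12; decide
    rw [ranksLit]
    simp [PySem.Dict.get?, PySem.Dict.contains_mk, beq_iff_eq, eq_ofList_iff,
      Ne.symm hb0, Ne.symm hb1, Ne.symm hb2, Ne.symm hb3, Ne.symm hb4, Ne.symm hb5, Ne.symm hb6, Ne.symm hb7, Ne.symm hb8, Ne.symm hb9, Ne.symm hb10, Ne.symm hb11, Ne.symm hb12]
  by_cases ha2 : a = 'D'
  · subst ha2
    by_cases hb0 : b = '2'
    · subst hb0; decide
    by_cases hb1 : b = '3'
    · subst hb1; decide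
    by_cases hb2 : b = '4'
    · subst hb2; decide
    by_cases hb3 : b = '5'
    · subst hb3; decide
    by_cases hb4 : b = '6'
    · subst hb4; decide
    by_cases hb5 : b = '7'
    · subst hb5; decide
    by_cases hb6 : b = '8'
    · subst hb6; decide
    by_cases hb7 : b = '9'
    · subst hb7; decide
    by_cases hb8 : b = 'T'
    · subst hb8; decide
    by_cases hb9 : b = 'J'
    · subst hb9; decide
    by_cases hb10 : b = 'Q'
    · subst hb10; decide
    by_cases hb11 : b = 'K'
    · subst hb11; decide
    by_cases hb12 : b = 'A'
    · subst hb12; decide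
    rw [ranksLit]
    simp [PySem.Dict.get?, PySem.Dict.contains_mk, beq_iff_eq, eq_ofList_iff,
      Ne.symm hb0, Ne.symm hb1, Ne.symm hb2, Ne.symm hb3, Ne.symm hb4, Ne.symm hb5, Ne.symm hb6, Ne.symm hb7, Ne.symm hb8, Ne.symm hb9, Ne.symm hb10, Ne.symm hb11, Ne.symm hb12]
  by_cases ha3 : a = 'C'
  · subst ha3
    by_cases hb0 : b = '2'
    · subst hb0; decide
    by_cases hb1 : b = '3'
    · subst hb1; decide
    by_cases hb2 : b = '4'
    · subst hb2; decide
    by_cases hb3 : b = '5'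
    · subst hb3; decide
    by_cases hb4 : b = '6'
    · subst hb4; decide
    by_cases hb5 : b = '7'
    · subst hb5; decide
    by_cases hb6 : b = '8'
    · subst hb6; decide
    by_cases hb7 : b = '9'
    · subst hb7; decide
    by_cases hb8 : b = 'T'
    · subst hb8; decide
    by_cases hb9 : b = 'J'
    · subst hb9; decide
    by_cases hb10 : b = 'Q'
    · subst hb10; decide
    by_cases hb11 : b = 'K'
    · subst hb11; decide
    by_cases hb12 : b = 'A'
    · subst hb12; decide
    rw [ranksLit]
    simp [PySem.Dict.get?, PySem.Dict.contains_mk, beq_iff_eq, eq_ofList_iff,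
      Ne.symm hb0, Ne.symm hb1, Ne.symm hb2, Ne.symm hb3, Ne.symm hb4, Ne.symm hb5, Ne.symm hb6, Ne.symm hb7, Ne.symm hb8, Ne.symm hb9, Ne.symm hb10, Ne.symm hb11, Ne.symm hb12]
  simp [pvSUITS, PySem.Set.contains, PySem.Set.ofList, PySem.Dict.get?, beq_iff_eq,
    eq_ofList_iff, ofList_eq_iff, Ne.symm ha0, Ne.symm ha1, Ne.symm ha2, Ne.symm ha3,
    ha0, ha1, ha2, ha3]

-- B's table lookup, written as A's per-token test sequence
theorem upper_ofList (l : List Char) :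
    PySem.Str.upper (String.ofList l) = String.ofList (l.map PySem.Chars.upperChar) := by
  apply String.toList_inj.mp
  simp [PySem.Str.toList_upper, PySem.Chars.upper]

theorem upper_eq (tok : String) :
    PySem.Str.upper tok = String.ofList (tok.toList.map PySem.Chars.upperChar) := by
  apply String.toList_inj.mp
  simp [PySem.Str.toList_upper, PySem.Chars.upper]

theorem parseB_lookup_eq (tok : String) :
    parseB_lookup tok =
      (if PySem.Str.len tok = 2 then
        match PySem.Str.pyGet? tok 0, PySem.Str.pyGet? tok 1 with
        | some c0, some c1 =>
          let suit := PySem.Str.upper (String.ofList [c0])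
          let rank := PySem.Str.upper (String.ofList [c1])
          if PySem.Set.contains pvSUITS suit && PySem.Dict.contains pvCARD_RANKS rank then
            some (suit, PySem.Dict.getD pvCARD_RANKS rank 0, suit ++ rank)
          else none
        | _, _ => none
      else none) := by
  unfold parseB_lookup
  rw [upper_eq tok]
  rcases hl : tok.toList with _ | ⟨a, _ | ⟨b, _ | ⟨c, rest⟩⟩⟩
  · rw [if_neg (by simp [PySem.Str.len_eq, hl])]
    exact table_get?_none_of_len_ne _ (by simp)
  · rw [if_neg (by simp [PySem.Str.len_eq, hl])]
    exact table_get?_none_of_len_ne _ (by simp)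
  · have h2 : PySem.Str.len tok = 2 := by simp [PySem.Str.len_eq, hl]
    have g0 : PySem.Str.pyGet? tok 0 = some a := by
      simp [PySem.Str.pyGet?, hl, PySem.List.pyGet?, PySem.List.pyIdx?]
    have g1 : PySem.Str.pyGet? tok 1 = some b := by
      simp [PySem.Str.pyGet?, hl, PySem.List.pyGet?, PySem.List.pyIdx?]
    rw [if_pos h2]
    simp only [g0, g1, List.map_cons, List.map_nil]
    rw [table_get?_pair]
    simp [upper_ofList]
  · rw [if_neg (by simp [PySem.Str.len_eq, hl]; omega)]
    exact table_get?_none_of_len_ne _ (by simp)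

-- A's early-return loop, characterised through B's mapM over the same tokens
theorem parseA_go_eq (tokens : List String) :
    ∀ cards, parseA_go tokens cards =
      (match tokens.mapM parseB_lookup with
       | some cs => cards ++ cs
       | none => []) := by
  induction tokens with
  | nil => intro cards; simp [parseA_go]
  | cons tok rest ih =>
    intro cards
    simp only [List.mapM_cons, parseB_lookup_eq tok]
    by_cases hlen : PySem.Str.len tok = 2
    · rw [parseA_go, if_neg (by simpa using hlen), if_pos hlen]
      cases hg0 : PySem.Str.pyGet? tok 0 with
      | none => simp
      | some c0 =>
        cases hg1 : PySem.Str.pyGet? tok 1 with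
        | none => simp
        | some c1 =>
          simp only []
          by_cases hc : (PySem.Set.contains pvSUITS (PySem.Str.upper (String.ofList [c0]))
              && PySem.Dict.contains pvCARD_RANKS (PySem.Str.upper (String.ofList [c1]))) = true
          · rw [if_neg (by simp_all), if_pos hc, ih]
            cases hrest : rest.mapM parseB_lookup with
            | none => simp
            | some cs => simp [List.append_assoc]
          · rw [if_pos ?_, if_neg hc]
            · simp
            · revert hc; cases PySem.Set.contains pvSUITS (PySem.Str.upper (String.ofList [c0])) <;>
                cases PySem.Dict.contains pvCARD_RANKS (PySem.Str.upper (String.ofList [c1])) <;> simp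
    · rw [parseA_go, if_pos (by simpa using hlen), if_neg hlen]
      simp

-- every token produced by Python's str.split() is nonempty and contains no whitespace
theorem split₀_go_tokens (s : List Char) :
    ∀ (cur : List Char) (acc : List (List Char)),
      (∀ c ∈ cur, PySem.Chars.isspace c = false) →
      (∀ l ∈ acc, l ≠ [] ∧ ∀ c ∈ l, PySem.Chars.isspace c = false) →
      ∀ l ∈ PySem.Chars.split₀.go s cur acc, l ≠ [] ∧ ∀ c ∈ l, PySem.Chars.isspace c = false := by
  induction s with
  | nil =>
    intro cur acc hcur hacc l hl
    simp only [PySem.Chars.split₀.go] at hl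
    split at hl
    · exact hacc l (by simpa using hl)
    · rw [List.mem_reverse, List.mem_cons] at hl
      rcases hl with h | h
      · subst h
        rename_i hne
        refine ⟨by simpa [List.isEmpty_iff] using hne, ?_⟩
        intro c hc; exact hcur c (by simpa using hc)
      · exact hacc l h
  | cons c rest ih =>
    intro cur acc hcur hacc l hl
    simp only [PySem.Chars.split₀.go] at hl
    split at hl
    · split at hl
      · exact ih [] acc (by simp) hacc l hl
      · refine ih [] (cur.reverse :: acc) (by simp) ?_ l hl
        intro l' hl'
        rcases List.mem_cons.mp hl' with h | h
        · subst h
          rename_i hne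
          exact ⟨by simpa [List.isEmpty_iff] using hne, fun c hc => hcur c (by simpa using hc)⟩
        · exact hacc l' h
    · refine ih (c :: cur) acc ?_ hacc l hl
      intro c' hc'
      rcases List.mem_cons.mp hc' with h | h
      · subst h; rename_i hns; simpa using hns
      · exact hcur c' h

theorem dropWhile_nonspace (l : List Char) (h : ∀ c ∈ l, PySem.Chars.isspace c = false) :
    List.dropWhile PySem.Chars.isspace l = l := by
  refine List.dropWhile_eq_self_iff.mpr ?_
  intro hne
  simp only [Bool.not_eq_true]
  exact h _ (List.getElem_mem hne)

theorem split₀_tokens (t : String) (p : String) (hp : p ∈ PySem.Str.split₀ t) :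
    p ≠ "" ∧ ∀ c ∈ p.toList, PySem.Chars.isspace c = false := by
  have h : p.toList ∈ (PySem.Str.split₀ t).map String.toList := List.mem_map_of_mem hp
  rw [PySem.Str.split₀_map_toList] at h
  have h2 := split₀_go_tokens t.toList [] [] (by simp) (by simp) p.toList h
  refine ⟨?_, h2.2⟩
  intro he
  exact h2.1 (by simp [he])

-- stripping a whitespace-free string is the identity
theorem strip_token (p : String) (h : ∀ c ∈ p.toList, PySem.Chars.isspace c = false) :
    PySem.Str.strip p = p := by
  have hl : (PySem.Str.strip p).toList = p.toList := by
    rw [PySem.Str.toList_strip]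
    unfold PySem.Chars.strip PySem.Chars.lstrip PySem.Chars.rstrip
    rw [dropWhile_nonspace _ h, dropWhile_nonspace, List.reverse_reverse]
    intro c hc
    exact h c (List.mem_reverse.mp hc)
  exact String.toList_inj.mp hl

-- ===== VERDICT (by name: the statement is the Claim_ definition above) =====
theorem parse_cards_text_spec : Claim_equal_parse_cards_text := by
  intro text _
  unfold Spec_parse_cards_text parse_cards_text parse_cards_text_alt
  match text with
  | none => simp
  | some t =>
    by_cases ht : t = ""
    · simp [ht]
    · simp only [if_neg ht]
      have hstrip : ∀ p ∈ PySem.Str.split₀ t, PySem.Str.strip p = p := fun p hp =>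
        strip_token p (split₀_tokens t p hp).2
      have hparts : ((PySem.Str.split₀ t).filter
          (fun p => decide (PySem.Str.strip p ≠ ""))).map (fun p => PySem.Str.strip p)
          = PySem.Str.split₀ t := by
        rw [List.filter_eq_self.mpr, List.map_congr_left hstrip, List.map_id']
        intro p hp
        simp [hstrip p hp, (split₀_tokens t p hp).1]
      rw [hparts, parseA_go_eq]
      simp
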